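-- pv_equiv track=rewrite | github.com/gerrowadat/adventofcode | 2019/4/4-2.py | get_repeats
-- ===== SOURCE A (Python) =====
-- def get_repeats(word):
--   repeats = []
--   in_repeat = False
--   start = None
--   end = None
--   for idx in range(1, len(word)):
--     if word[idx] == word[idx-1]:
--       if in_repeat:
--         # finish up if this is the last digit
--         if idx == (len(word)-1):
--           repeats.append(word[start:idx+1])
--         continue
--       else:
--         start = idx-1
--         if idx == (len(word)-1):
--           repeats.append(word[start:idx+1])
--         in_repeat = True
--     else:
--       if in_repeat:
--         end = idx
--         repeats.append(word[start:end])
--         in_repeat=False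
--   return repeats
-- ===== SOURCE B (Python) =====
-- def get_repeats(word):
--   repeats = []
--   n = len(word)
--   i = 0
--   while i < n:
--     c = word[i]
--     j = i + 1
--     while j < n and word[j] == c:
--       j += 1
--     if j - i >= 2:
--       repeats.append(word[i:j])
--     i = j
--   return repeats
-- ===== Notes on version B (the rewrite author's own statement) =====
-- stated objective: simpler
-- what changed: Replaces A's in_repeat/start/end flag state machine over pairwise index comparisons (with a special 'last index' append case duplicated in two branches) by a two-pointer scan that jumps run by run: an inner loop finds the end of each run of equal characters and the run is emitted at once when its length is at least 2.
import Mathlib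
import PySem

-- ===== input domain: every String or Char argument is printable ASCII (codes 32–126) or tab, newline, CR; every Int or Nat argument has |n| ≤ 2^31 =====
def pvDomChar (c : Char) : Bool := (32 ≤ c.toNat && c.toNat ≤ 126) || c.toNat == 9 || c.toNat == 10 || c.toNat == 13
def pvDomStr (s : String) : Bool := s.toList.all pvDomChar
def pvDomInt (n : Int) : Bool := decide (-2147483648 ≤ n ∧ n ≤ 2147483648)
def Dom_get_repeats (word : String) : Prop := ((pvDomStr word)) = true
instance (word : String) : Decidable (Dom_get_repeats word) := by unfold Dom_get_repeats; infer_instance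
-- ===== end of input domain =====

-- B replaces A's in_repeat/start flag machine by a two-pointer run-by-run scan (objective: simpler; same output).

-- ===== PORT A =====
-- loop body of A's 'for idx in range(1, len(word))'; start=None is modeled as 0 (it is never
-- read before being assigned, since it is only read when in_repeat is true)
def aStep (word : String) (st : List String × Bool × Int) (idx : Int) : List String × Bool × Int :=
  match st with
  | (repeats, in_repeat, start) =>
    if PySem.Str.pyGet? word idx = PySem.Str.pyGet? word (idx - 1) then
      if in_repeat then
        if idx = PySem.Str.len word - 1 then
          (repeats ++ [PySem.Str.slice word (some start) (some (idx + 1))], in_repeat, start)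
        else (repeats, in_repeat, start)
      else
        if idx = PySem.Str.len word - 1 then
          (repeats ++ [PySem.Str.slice word (some (idx - 1)) (some (idx + 1))], true, idx - 1)
        else (repeats, true, idx - 1)
    else
      if in_repeat then
        (repeats ++ [PySem.Str.slice word (some start) (some idx)], false, start)
      else (repeats, in_repeat, start)

def get_repeats (word : String) : List String :=
  ((PySem.List.pyRange 1 (PySem.Str.len word) 1).foldl (aStep word) ([], false, 0)).1

-- ===== PORT B =====
-- inner while loop of B: 'while j < n and word[j] == c: j += 1'
def grInner (l : List Char) (n : Nat) (c : Char) (j : Nat) : Nat :=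
  if h : j < n ∧ l.getD j default = c then grInner l n c (j + 1) else j
termination_by n - j
decreasing_by omega

-- needed for grOuter's termination: the inner loop never moves j backwards
theorem le_grInner (l : List Char) (n : Nat) (c : Char) (j : Nat) : j ≤ grInner l n c j := by
  unfold grInner
  split
  · have := le_grInner l n c (j + 1); omega
  · exact Nat.le_refl _
termination_by n - j
decreasing_by omega

-- outer while loop of B; word[i:j] with 0 ≤ i ≤ j ≤ n is exactly (drop i).take (j-i)
def grOuter (l : List Char) (n : Nat) (i : Nat) (repeats : List String) : List String :=
  if _h : i < n then
    let j := grInner l n (l.getD i default) (i + 1)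
    grOuter l n j
      (if 2 ≤ j - i then repeats ++ [String.ofList ((l.drop i).take (j - i))] else repeats)
  else repeats
termination_by n - i
decreasing_by
  have := le_grInner l n (l.getD i default) (i + 1)
  omega

def get_repeats_alt (word : String) : List String :=
  grOuter word.toList word.toList.length 0 []

-- ===== PRECONDITION & SPEC =====
def Spec_get_repeats (word : String) (out : List String) : Prop := out = get_repeats_alt word
instance (word : String) (out : List String) : Decidable (Spec_get_repeats word out) := by unfold Spec_get_repeats; infer_instance

-- ===== CLAIM (what is proved, stated in full; the proofs are below) =====
def Claim_equal_get_repeats : Prop := ∀ (word : String), Dom_get_repeats word → Spec_get_repeats word (get_repeats word)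

-- ===== LEMMAS AND PROOFS =====

-- A's fold over range(1, n), rephrased as a recursion on the index
def aFrom (word : String) (i : Nat) (st : List String × Bool × Int) : List String × Bool × Int :=
  if i < word.toList.length then aFrom word (i + 1) (aStep word st (i : Int)) else st
termination_by word.toList.length - i
decreasing_by simp_all [String.length_toList]; omega

theorem foldl_aStep (word : String) (i : Nat) (st : List String × Bool × Int) :
    (PySem.List.pyRange (i : Int) (word.toList.length : Int) 1).foldl (aStep word) st
      = aFrom word i st := by
  unfold aFrom
  split
  · next h =>
    rw [PySem.List.pyRange_one_cons (by exact_mod_cast h)]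
    simp only [List.foldl_cons]
    have hc : ((i : Int) + 1) = (((i + 1 : Nat)) : Int) := by push_cast; ring
    rw [hc, foldl_aStep word (i + 1)]
  · next h =>
    rw [PySem.List.pyRange_one_eq_nil (by exact_mod_cast Nat.le_of_not_lt h)]
    simp
termination_by word.toList.length - i
decreasing_by omega

theorem aFrom_ge (word : String) (i : Nat) (st : List String × Bool × Int)
    (h : word.toList.length ≤ i) : aFrom word i st = st := by
  unfold aFrom
  rw [if_neg (Nat.not_lt.mpr h)]

theorem grInner_ge (l : List Char) (n : Nat) (c : Char) (j : Nat) (h : n ≤ j) :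
    grInner l n c j = j := by
  unfold grInner
  rw [dif_neg (by omega)]

theorem grOuter_ge (l : List Char) (n i : Nat) (reps : List String) (h : n ≤ i) :
    grOuter l n i reps = reps := by
  unfold grOuter
  rw [dif_neg (by omega)]

theorem grInner_step (l : List Char) (n : Nat) (c : Char) (j : Nat)
    (h1 : j < n) (h2 : l.getD j default = c) :
    grInner l n c j = grInner l n c (j + 1) := by
  conv_lhs => rw [grInner]
  rw [dif_pos ⟨h1, h2⟩]

theorem grInner_stop (l : List Char) (n : Nat) (c : Char) (j : Nat)
    (h : ¬ (j < n ∧ l.getD j default = c)) :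
    grInner l n c j = j := by
  unfold grInner
  rw [dif_neg h]

theorem grOuter_step (l : List Char) (n i : Nat) (reps : List String) (h : i < n) :
    grOuter l n i reps =
      grOuter l n (grInner l n (l.getD i default) (i + 1))
        (if 2 ≤ grInner l n (l.getD i default) (i + 1) - i then
           reps ++ [String.ofList ((l.drop i).take (grInner l n (l.getD i default) (i + 1) - i))]
         else reps) := by
  conv_lhs => rw [grOuter]
  rw [dif_pos h]

-- word[a:b] with Nat bounds, as a String literal over toList
theorem strSlice_nat (word : String) (a b : Nat) :
    PySem.Str.slice word (some (a : Int)) (some (b : Int))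
      = String.ofList ((word.toList.drop a).take (b - a)) := by
  have h : (PySem.Str.slice word (some (a : Int)) (some (b : Int))).toList
      = (word.toList.drop a).take (b - a) := by
    simp [PySem.List.slice_natCast]
  rw [← h]
  exact String.ofList_toList.symm

-- A's loop body at a valid index, expressed over word.toList with Nat indices
theorem aStep_char (word : String) (reps : List String) (b : Bool) (s i : Nat)
    (h1 : 1 ≤ i) (h2 : i < word.toList.length) :
    aStep word (reps, b, (s : Int)) (i : Int) =
      (if word.toList.getD i default = word.toList.getD (i - 1) default then
         if b then
           if i = word.toList.length - 1 then
             (reps ++ [String.ofList ((word.toList.drop s).take (i + 1 - s))], b, (s : Int))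
           else (reps, b, (s : Int))
         else
           if i = word.toList.length - 1 then
             (reps ++ [String.ofList ((word.toList.drop (i - 1)).take (i + 1 - (i - 1)))], true,
              ((i - 1 : Nat) : Int))
           else (reps, true, ((i - 1 : Nat) : Int))
       else
         if b then (reps ++ [String.ofList ((word.toList.drop s).take (i - s))], false, (s : Int))
         else (reps, b, (s : Int))) := by
  have hl : PySem.Str.len word = (word.toList.length : Int) := by simp
  have hm1 : ((i : Int) - 1) = ((i - 1 : Nat) : Int) := by omega
  have hp1 : ((i : Int) + 1) = ((i + 1 : Nat) : Int) := by omega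
  have h2' : i - 1 < word.toList.length := by omega
  have hcond : (PySem.Str.pyGet? word (i : Int) = PySem.Str.pyGet? word ((i : Int) - 1)) ↔
      (word.toList.getD i default = word.toList.getD (i - 1) default) := by
    rw [hm1]
    simp only [PySem.Str.pyGet?_natCast]
    rw [List.getElem?_eq_getElem h2, List.getElem?_eq_getElem h2']
    rw [List.getD_eq_getElem _ _ h2, List.getD_eq_getElem _ _ h2']
    exact ⟨fun h => Option.some.inj h, fun h => congrArg some h⟩
  have hlast : (((i : Int)) = PySem.Str.len word - 1) ↔ (i = word.toList.length - 1) := by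
    rw [hl]
    omega
  unfold aStep
  dsimp only
  by_cases hc : word.toList.getD i default = word.toList.getD (i - 1) default
  · rw [if_pos (hcond.mpr hc), if_pos hc]
    cases b
    · simp only [Bool.false_eq_true, if_false]
      by_cases hla : i = word.toList.length - 1
      · rw [if_pos (hlast.mpr hla), if_pos hla, hm1, hp1, strSlice_nat]
      · rw [if_neg (fun h => hla (hlast.mp h)), if_neg hla, hm1]
    · simp only [if_true]
      by_cases hla : i = word.toList.length - 1
      · rw [if_pos (hlast.mpr hla), if_pos hla, hp1, strSlice_nat]
      · rw [if_neg (fun h => hla (hlast.mp h)), if_neg hla]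
  · rw [if_neg (fun h => hc (hcond.mp h)), if_neg hc]
    cases b
    · simp
    · simp only [if_true]
      rw [strSlice_nat]

-- shared base case: once i is past the end, A's fold is finished and B's scan adds nothing
theorem main_base (word : String) (i s : Nat) (reps : List String)
    (h1 : 1 ≤ i) (hge : word.toList.length ≤ i) :
    ((aFrom word i (reps, false, (s : Int))).1
        = grOuter word.toList word.toList.length (i - 1) reps)
    ∧ (s + 2 ≤ i → i < word.toList.length →
        (∀ t, s ≤ t → t < i → word.toList.getD t default = word.toList.getD s default) →
        (aFrom word i (reps, true, (s : Int))).1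
          = grOuter word.toList word.toList.length
              (grInner word.toList word.toList.length (word.toList.getD s default) i)
              (reps ++ [String.ofList ((word.toList.drop s).take
                  (grInner word.toList word.toList.length (word.toList.getD s default) i - s))])) := by
  constructor
  · rw [aFrom_ge _ _ _ hge]
    by_cases hb : i - 1 < word.toList.length
    · rw [grOuter_step _ _ _ _ hb]
      rw [grInner_ge _ _ _ _ (by omega)]
      rw [if_neg (by omega)]
      rw [grOuter_ge _ _ _ _ (by omega)]
    · rw [grOuter_ge _ _ _ _ (by omega)]
  · intro _ hin _
    omega

-- the main invariant: A's remaining fold from index i equals B's remaining scan,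
-- both when A is between runs (first conjunct) and inside a run started at s (second)
theorem main_inv (word : String) : ∀ (k i s : Nat) (reps : List String),
    word.toList.length - i ≤ k → 1 ≤ i →
    ((aFrom word i (reps, false, (s : Int))).1
        = grOuter word.toList word.toList.length (i - 1) reps)
    ∧ (s + 2 ≤ i → i < word.toList.length →
        (∀ t, s ≤ t → t < i → word.toList.getD t default = word.toList.getD s default) →
        (aFrom word i (reps, true, (s : Int))).1
          = grOuter word.toList word.toList.length
              (grInner word.toList word.toList.length (word.toList.getD s default) i)
              (reps ++ [String.ofList ((word.toList.drop s).take
                  (grInner word.toList word.toList.length (word.toList.getD s default) i - s))])) := by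
  intro k
  induction k with
  | zero =>
    intro i s reps hk h1
    exact main_base word i s reps h1 (by omega)
  | succ k ih =>
    intro i s reps hk h1
    by_cases hn : i < word.toList.length
    · have hi1 : i - 1 + 1 = i := by omega
      constructor
      · -- between runs
        unfold aFrom
        rw [if_pos hn, aStep_char word reps false s i h1 hn]
        by_cases hc : word.toList.getD i default = word.toList.getD (i - 1) default
        · rw [if_pos hc]
          simp only [Bool.false_eq_true, if_false]
          by_cases hla : i = word.toList.length - 1
          · rw [if_pos hla]
            rw [aFrom_ge _ _ _ (by omega)]
            rw [grOuter_step _ _ _ _ (by omega), hi1]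
            rw [grInner_step _ _ _ _ hn hc]
            rw [grInner_ge _ _ _ _ (by omega)]
            rw [if_pos (by omega)]
            rw [grOuter_ge _ _ _ _ (by omega)]
          · rw [if_neg hla]
            have hM := (ih (i + 1) (i - 1) reps (by omega) (by omega)).2 (by omega) (by omega)
              (by
                intro t ht1 ht2
                have : t = i - 1 ∨ t = i := by omega
                rcases this with h | h
                · rw [h]
                · rw [h]; exact hc)
            have hj := le_grInner word.toList word.toList.length
              (word.toList.getD (i - 1) default) (i + 1)
            conv_rhs => rw [grOuter_step _ _ _ _ (by omega), hi1,
              grInner_step _ _ _ _ hn hc]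
            rw [hM, if_pos (by omega)]
        · rw [if_neg hc]
          simp only [Bool.false_eq_true, if_false]
          have hL := (ih (i + 1) s reps (by omega) (by omega)).1
          simp only [Nat.add_sub_cancel] at hL
          rw [hL]
          conv_rhs => rw [grOuter_step _ _ _ _ (by omega), hi1]
          rw [grInner_stop _ _ _ _ (by
            intro h
            exact hc h.2)]
          rw [if_neg (by omega)]
      · -- inside a run that started at s
        intro hs hin hrun
        have hc' : word.toList.getD (i - 1) default = word.toList.getD s default :=
          hrun (i - 1) (by omega) (by omega)
        unfold aFrom
        rw [if_pos hn, aStep_char word reps true s i h1 hn]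
        by_cases hc : word.toList.getD i default = word.toList.getD (i - 1) default
        · rw [if_pos hc]
          simp only [if_true]
          have hgi : grInner word.toList word.toList.length (word.toList.getD s default) i
              = grInner word.toList word.toList.length (word.toList.getD s default) (i + 1) :=
            grInner_step _ _ _ _ hn (hc.trans hc')
          by_cases hla : i = word.toList.length - 1
          · rw [if_pos hla]
            rw [aFrom_ge _ _ _ (by omega)]
            rw [hgi, grInner_ge _ _ _ _ (by omega)]
            rw [grOuter_ge _ _ _ _ (by omega)]
          · rw [if_neg hla]
            have hM := (ih (i + 1) s reps (by omega) (by omega)).2 (by omega) (by omega)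
              (by
                intro t ht1 ht2
                by_cases h : t = i
                · rw [h]; exact hc.trans hc'
                · exact hrun t ht1 (by omega))
            rw [hM, hgi]
        · rw [if_neg hc]
          simp only [if_true]
          have hL := (ih (i + 1) s
            (reps ++ [String.ofList ((word.toList.drop s).take (i - s))])
            (by omega) (by omega)).1
          simp only [Nat.add_sub_cancel] at hL
          rw [hL]
          rw [grInner_stop _ _ _ _ (by
            intro h
            exact hc (h.2.trans hc'.symm))]
    · exact main_base word i s reps h1 (by omega)

-- ===== VERDICT (by name: the statement is the Claim_ definition above) =====
theorem get_repeats_spec : Claim_equal_get_repeats := by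
  intro word _
  unfold Spec_get_repeats get_repeats get_repeats_alt
  have hlen : PySem.Str.len word = (word.toList.length : Int) := by
    simp [PySem.Str.len_eq]
  by_cases hn : word.toList.length = 0
  · rw [hlen, hn]
    rw [PySem.List.pyRange_one_eq_nil (by norm_num)]
    rw [grOuter_ge _ _ _ _ (by omega)]
    rfl
  · rw [hlen]
    have hf := foldl_aStep word 1 ([], false, ((0 : Nat) : Int))
    norm_num at hf
    have := (main_inv word word.toList.length 1 0 [] (by omega) (by omega)).1
    norm_num at this
    simp only [String.length_toList]
    rw [hf]
    exact this
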